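-- pv_equiv track=rewrite | github.com/chenweidu666/chenwei-tech-docs | scripts/fetch_github_docs.py | _match_prefixes
-- ===== SOURCE A (Python) =====
-- def _match_prefixes(path: str, prefixes: tuple[str, ...]) -> bool:
--     for p in prefixes:
--         pn = p.rstrip("/")
--         if path == pn or path == p:
--             return True
--         if path.startswith(pn + "/"):
--             return True
--     return False
-- ===== SOURCE B (Python) =====
-- def _match_prefixes(path: str, prefixes: tuple[str, ...]) -> bool:
--     # Alternative decomposition: instead of scanning every prefix with
--     # rstrip/startswith, build the set of rstripped prefixes once and walk
--     # the path's own '/'-boundary prefixes, testing each with a set lookup.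
--     norm = {p.rstrip("/") for p in prefixes}
--     parts = path.split("/")
--     cur = parts[0]
--     if cur in norm:
--         return True
--     for part in parts[1:]:
--         cur += "/" + part
--         if cur in norm:
--             return True
--     return False
-- ===== Notes on version B (the rewrite author's own statement) =====
-- stated objective: alternative
-- what changed: Instead of scanning every prefix and running rstrip/startswith per prefix, B builds a set of rstripped prefixes once and makes a single pass over the path's own '/'-boundary prefixes, testing each with an O(1) set lookup.
import Mathlib
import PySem

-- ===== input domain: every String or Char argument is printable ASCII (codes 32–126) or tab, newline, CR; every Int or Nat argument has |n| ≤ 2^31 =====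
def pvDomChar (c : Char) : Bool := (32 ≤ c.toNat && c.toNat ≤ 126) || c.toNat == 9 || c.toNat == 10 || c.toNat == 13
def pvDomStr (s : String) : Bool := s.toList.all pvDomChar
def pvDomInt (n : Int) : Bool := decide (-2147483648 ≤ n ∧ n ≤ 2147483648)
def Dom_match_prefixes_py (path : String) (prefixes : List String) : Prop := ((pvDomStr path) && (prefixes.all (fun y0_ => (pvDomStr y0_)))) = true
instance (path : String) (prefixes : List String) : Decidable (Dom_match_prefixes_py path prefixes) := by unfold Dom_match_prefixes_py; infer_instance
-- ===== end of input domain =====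

-- B replaces A's scan-every-prefix-with-startswith by one pass over the path's own
-- '/'-boundary prefixes, looked up in a set of the rstripped prefixes built once.

-- p.rstrip("/") on char lists: drop trailing '/' characters (hand port; exact for the literal chars argument "/")
def pyRstripSlash (cs : List Char) : List Char :=
  (cs.reverse.dropWhile (fun c => c == '/')).reverse

-- ===== PORT A =====
-- for p in prefixes: pn = p.rstrip("/"); if path == pn or path == p: return True;
-- if path.startswith(pn + "/"): return True;  return False
def matchLoopA (path : List Char) (prefixes : List (List Char)) : Bool :=
  match prefixes with
  | [] => false
  | p :: rest =>
    let pn := pyRstripSlash p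
    if path == pn || path == p then true
    else if PySem.Chars.startswith path (pn ++ ['/']) then true
    else matchLoopA path rest

def match_prefixes_py (path : String) (prefixes : List String) : Bool :=
  matchLoopA path.toList (prefixes.map String.toList)

-- ===== PORT B =====
-- the loop 'for part in parts[1:]: cur += "/" + part; if cur in norm: return True'
def matchLoopB (norm : PySem.Set (List Char)) (cur : List Char) (parts : List (List Char)) : Bool :=
  match parts with
  | [] => false
  | part :: rest =>
    let cur' := cur ++ '/' :: part
    if norm.contains cur' then true else matchLoopB norm cur' rest

-- norm = {p.rstrip("/") for p in prefixes}; parts = path.split("/") (List.splitOn is the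
-- library form of str.split for the non-empty single-char separator "/"); cur = parts[0]
def match_prefixes_py_alt (path : String) (prefixes : List String) : Bool :=
  let norm : PySem.Set (List Char) :=
    PySem.Set.ofList (prefixes.map (fun p => pyRstripSlash p.toList))
  match path.toList.splitOn '/' with
  | [] => false  -- unreachable: splitOn never returns []
  | cur :: rest => if norm.contains cur then true else matchLoopB norm cur rest

-- ===== PRECONDITION & SPEC =====
def Spec_match_prefixes_py (path : String) (prefixes : List String) (out : Bool) : Prop := out = match_prefixes_py_alt path prefixes
instance (path : String) (prefixes : List String) (out : Bool) : Decidable (Spec_match_prefixes_py path prefixes out) := by unfold Spec_match_prefixes_py; infer_instance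

-- ===== CLAIM (what is proved, stated in full; the proofs are below) =====
def Claim_equal_match_prefixes_py : Prop := ∀ (path : String) (prefixes : List String), Dom_match_prefixes_py path prefixes → Spec_match_prefixes_py path prefixes (match_prefixes_py path prefixes)

-- ===== LEMMAS AND PROOFS =====

-- the successive values of B's accumulator `cur`, starting from `cur` itself
def pvJoins (cur : List Char) (parts : List (List Char)) : List (List Char) :=
  match parts with
  | [] => [cur]
  | part :: rest => cur :: pvJoins (cur ++ '/' :: part) rest

-- B's loop returns true iff some accumulator value is in the set
lemma loopB_iff (norm : PySem.Set (List Char)) (cur : List Char) (parts : List (List Char)) :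
    (if norm.contains cur then true else matchLoopB norm cur parts) = true ↔
      ∃ j ∈ pvJoins cur parts, j ∈ norm := by
  induction parts generalizing cur with
  | nil => simp [matchLoopB, pvJoins]
  | cons part rest ih =>
    by_cases h : norm.contains cur = true
    · simp only [h, if_true, true_iff]
      exact ⟨cur, by simp [pvJoins], (PySem.Set.contains_iff _ _).mp h⟩
    · rw [if_neg h]
      show matchLoopB norm cur (part :: rest) = true ↔ _
      simp only [matchLoopB]
      rw [ih (cur ++ '/' :: part)]
      simp only [pvJoins, List.mem_cons]
      constructor
      · rintro ⟨j, hj, hm⟩; exact ⟨j, Or.inr hj, hm⟩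
      · rintro ⟨j, hj | hj, hm⟩
        · subst hj; exact absurd ((PySem.Set.contains_iff _ _).mpr hm) h
        · exact ⟨j, hj, hm⟩

-- pieces of splitOn never contain the separator
lemma no_slash_splitOnP (cs : List Char) :
    ∀ l ∈ cs.splitOnP (· == '/'), '/' ∉ l := by
  induction cs with
  | nil => simp
  | cons c cs ih =>
    intro l hl
    rw [List.splitOnP_cons] at hl
    by_cases hc : c = '/'
    · simp [hc] at hl
      rcases hl with h | h
      · simp [h]
      · exact ih l h
    · have hcb : (c == '/') = false := by simp [hc]
      rw [hcb, if_neg (by simp)] at hl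
      obtain ⟨h0, t0, ht⟩ := List.exists_cons_of_ne_nil (List.splitOnP_ne_nil (· == '/') cs)
      rw [ht, List.modifyHead_cons, List.mem_cons] at hl
      have hh0 : h0 ∈ cs.splitOnP (· == '/') := by rw [ht]; exact List.mem_cons_self
      rcases hl with h | h
      · subst h
        intro hm
        rcases List.mem_cons.mp hm with h | h
        · exact hc h.symm
        · exact ih h0 hh0 h
      · have : l ∈ cs.splitOnP (· == '/') := by rw [ht]; exact List.mem_cons.mpr (Or.inr h)
        exact ih l this

lemma intercalate_cons_flatten (x : Char) (a : List Char) (l : List (List Char)) :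
    [x].intercalate (a :: l) = a ++ (l.map (x :: ·)).flatten := by
  induction l generalizing a with
  | nil => simp [List.intercalate]
  | cons b l ih =>
    have hb := ih b
    simp only [List.intercalate] at hb ⊢
    simp only [List.intersperse_cons₂, List.flatten_cons, List.map_cons]
    simp [hb]

-- splitOn decomposes the string
lemma splitOn_decomp (cs p0 : List Char) (rest : List (List Char))
    (h : cs.splitOn '/' = p0 :: rest) :
    cs = p0 ++ (rest.map ('/' :: ·)).flatten := by
  have hi := List.intercalate_splitOn (xs := cs) '/'
  rw [h, intercalate_cons_flatten] at hi
  exact hi.symm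

-- if j followed by '/' is a prefix of cs, cs carries '/' at index j.length
lemma slash_at {cs j : List Char} (h : j ++ ['/'] <+: cs) :
    ∃ (hlt : j.length < cs.length), cs[j.length] = '/' := by
  obtain ⟨t, ht⟩ := h
  subst ht
  refine ⟨by simp, ?_⟩
  simp

lemma prefix_eq_of_length {cs j cur : List Char} (hj : j <+: cs) (hc : cur <+: cs)
    (h : j.length = cur.length) : j = cur :=
  (List.prefix_of_prefix_length_le hj hc (le_of_eq h)).eq_of_length h

-- the invariant of B's accumulator: its values are exactly the '/'-boundary prefixes of
-- cs extending cur (plus cs itself)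
lemma joins_inv (parts : List (List Char)) (cur cs j : List Char)
    (hcs : cs = cur ++ (parts.map ('/' :: ·)).flatten)
    (hparts : ∀ part ∈ parts, '/' ∉ part) :
    j ∈ pvJoins cur parts ↔ j = cs ∨ (cur.length ≤ j.length ∧ j ++ ['/'] <+: cs) := by
  induction parts generalizing cur with
  | nil =>
    simp only [List.map_nil, List.flatten_nil, List.append_nil] at hcs
    subst hcs
    simp only [pvJoins, List.mem_singleton]
    constructor
    · rintro rfl; exact Or.inl rfl
    · rintro (rfl | ⟨hle, hpre⟩)
      · rfl
      · have := hpre.length_le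
        simp at this; omega
  | cons part rest ih =>
    have hcs' : cs = (cur ++ '/' :: part) ++ (rest.map ('/' :: ·)).flatten := by
      simpa [List.append_assoc] using hcs
    have hrest : ∀ q ∈ rest, '/' ∉ q := fun q hq => hparts q (List.mem_cons.mpr (Or.inr hq))
    simp only [pvJoins, List.mem_cons]
    rw [ih (cur ++ '/' :: part) hcs' hrest]
    constructor
    · rintro (rfl | h | ⟨hle, hpre⟩)
      · exact Or.inr ⟨le_refl _, by rw [hcs']; exact ⟨part ++ (rest.map ('/' :: ·)).flatten, by simp⟩⟩
      · exact Or.inl h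
      · refine Or.inr ⟨?_, hpre⟩
        simp at hle ⊢; omega
    · rintro (h | ⟨hle, hpre⟩)
      · exact Or.inr (Or.inl h)
      · by_cases hbig : cur.length + 1 + part.length ≤ j.length
        · exact Or.inr (Or.inr ⟨by simp only [List.length_append, List.length_cons]; omega, hpre⟩)
        · by_cases heq : j.length = cur.length
          · left
            have hj : j <+: cs := (List.prefix_append j ['/']).trans hpre
            have hcur : cur <+: cs := by
              rw [hcs]; exact List.prefix_append cur _
            exact prefix_eq_of_length hj hcur heq
          · -- cur.length < j.length < cur'.length: cs[j.length] = '/' lies inside part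
            exfalso
            obtain ⟨hlt, hget⟩ := slash_at hpre
            have hlen2 : j.length < (cur ++ '/' :: part).length := by simp; omega
            have hget2 : cs[j.length]'hlt = (cur ++ '/' :: part)[j.length]'hlen2 :=
              (List.IsPrefix.getElem ⟨_, hcs'.symm⟩ hlen2).symm
            have hk : cur.length < j.length := by omega
            have hget3 : (cur ++ '/' :: part)[j.length]'hlen2 =
                ('/' :: part)[j.length - cur.length]'(by simp; omega) := by
              rw [List.getElem_append_right (by omega)]
            rcases Nat.exists_eq_add_of_lt hk with ⟨k, hkk⟩
            have hkidx : j.length - cur.length = k + 1 := by omega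
            have hget4 : ('/' :: part)[j.length - cur.length]'(by simp; omega) =
                part[k]'(by simp at hlen2; omega) := by
              simp only [hkidx]
              exact List.getElem_cons_succ ..
            have hmem : part[k]'(by simp at hlen2; omega) ∈ part := List.getElem_mem _
            rw [hget2, hget3, hget4] at hget
            exact hparts part List.mem_cons_self (hget ▸ hmem)

-- top level: membership among B's accumulator values, for parts = cs.split("/")
lemma mem_joins_splitOn_iff (cs p0 j : List Char) (rest : List (List Char))
    (h : cs.splitOn '/' = p0 :: rest) :
    j ∈ pvJoins p0 rest ↔ j = cs ∨ j ++ ['/'] <+: cs := by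
  have h' : cs.splitOnP (· == '/') = p0 :: rest := h
  have hdec := splitOn_decomp cs p0 rest h
  have hp0 : '/' ∉ p0 := no_slash_splitOnP cs p0 (by rw [h']; exact List.mem_cons_self)
  have hrest : ∀ q ∈ rest, '/' ∉ q := fun q hq =>
    no_slash_splitOnP cs q (by rw [h']; exact List.mem_cons.mpr (Or.inr hq))
  rw [joins_inv rest p0 cs j hdec hrest]
  constructor
  · rintro (h | ⟨_, h⟩)
    · exact Or.inl h
    · exact Or.inr h
  · rintro (h | h)
    · exact Or.inl h
    · refine Or.inr ⟨?_, h⟩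
      by_contra hlt
      rw [Nat.not_le] at hlt
      obtain ⟨hlen, hget⟩ := slash_at h
      have : cs[j.length]'hlen = p0[j.length]'hlt :=
        (List.IsPrefix.getElem ⟨_, hdec.symm⟩ hlt).symm
      exact hp0 (hget ▸ this ▸ List.getElem_mem _)

-- A's loop returns true iff some prefix passes A's three-way test
lemma loopA_iff (path : List Char) (ps : List (List Char)) :
    matchLoopA path ps = true ↔
      ∃ p ∈ ps, path = pyRstripSlash p ∨ path = p ∨ (pyRstripSlash p ++ ['/']) <+: path := by
  induction ps with
  | nil => simp [matchLoopA]
  | cons p rest ih =>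
    simp only [matchLoopA]
    by_cases h1 : (path == pyRstripSlash p || path == p) = true
    · simp only [h1, if_true, true_iff]
      rcases Bool.or_eq_true_iff.mp h1 with h | h
      · exact ⟨p, List.mem_cons_self, Or.inl (by simpa using h)⟩
      · exact ⟨p, List.mem_cons_self, Or.inr (Or.inl (by simpa using h))⟩
    · rw [if_neg (by simpa using h1)]
      by_cases h2 : PySem.Chars.startswith path (pyRstripSlash p ++ ['/']) = true
      · simp only [h2, if_true, true_iff]
        exact ⟨p, List.mem_cons_self, Or.inr (Or.inr ((PySem.Chars.startswith_iff _ _).mp h2))⟩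
      · rw [if_neg h2, ih]
        simp only [List.mem_cons]
        constructor
        · rintro ⟨q, hq, hc⟩; exact ⟨q, Or.inr hq, hc⟩
        · rintro ⟨q, rfl | hq, hc⟩
          · exfalso
            rcases hc with hc | hc | hc
            · exact h1 (by simp [hc])
            · exact h1 (by simp [hc])
            · exact h2 ((PySem.Chars.startswith_iff _ _).mpr hc)
          · exact ⟨q, hq, hc⟩

-- every string is its rstrip("/"), or its rstrip followed by '/' is a prefix of it
lemma rstrip_decomp (cs : List Char) :
    cs = pyRstripSlash cs ∨ pyRstripSlash cs ++ ['/'] <+: cs := by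
  have hsplit : cs.reverse.takeWhile (fun c => c == '/') ++
      cs.reverse.dropWhile (fun c => c == '/') = cs.reverse :=
    List.takeWhile_append_dropWhile
  set t := cs.reverse.takeWhile (fun c => c == '/') with ht
  cases htr : t.reverse with
  | nil =>
    left
    have ht0 : t = [] := by simpa using congrArg List.reverse htr
    rw [ht0, List.nil_append] at hsplit
    unfold pyRstripSlash
    rw [hsplit, List.reverse_reverse]
  | cons h u =>
    right
    have hh : h = '/' := by
      have hmem : h ∈ t := by
        rw [← List.reverse_reverse t, htr]; simp
      simpa using List.mem_takeWhile_imp hmem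
    have hcs : cs = pyRstripSlash cs ++ t.reverse := by
      have h2 := congrArg List.reverse hsplit
      rw [List.reverse_append, List.reverse_reverse] at h2
      unfold pyRstripSlash
      exact h2.symm
    refine ⟨u, ?_⟩
    conv_rhs => rw [hcs, htr, hh]
    simp

-- ===== VERDICT (by name: the statement is the Claim_ definition above) =====
theorem match_prefixes_py_spec : Claim_equal_match_prefixes_py := by
  intro path prefixes _
  unfold Spec_match_prefixes_py
  simp only [match_prefixes_py, match_prefixes_py_alt]
  obtain ⟨p0, rest, hsplit⟩ :=
    List.exists_cons_of_ne_nil (List.splitOnP_ne_nil (· == '/') path.toList)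
  have hsplit' : path.toList.splitOn '/' = p0 :: rest := hsplit
  rw [hsplit']
  rw [Bool.eq_iff_iff, loopA_iff, loopB_iff]
  constructor
  · rintro ⟨p, hp, hc⟩
    obtain ⟨q, hq, rfl⟩ := List.mem_map.mp hp
    refine ⟨pyRstripSlash q.toList, ?_, ?_⟩
    · rw [mem_joins_splitOn_iff path.toList p0 _ rest hsplit']
      rcases hc with h | h | h
      · exact Or.inl h.symm
      · rcases rstrip_decomp q.toList with h2 | h2
        · exact Or.inl (by rw [← h2, h])
        · exact Or.inr (h ▸ h2)
      · exact Or.inr h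
    · rw [PySem.Set.mem_ofList]
      exact List.mem_map.mpr ⟨q, hq, rfl⟩
  · rintro ⟨j, hj, hm⟩
    rw [PySem.Set.mem_ofList] at hm
    obtain ⟨q, hq, rfl⟩ := List.mem_map.mp hm
    refine ⟨q.toList, List.mem_map.mpr ⟨q, hq, rfl⟩, ?_⟩
    rw [mem_joins_splitOn_iff path.toList p0 _ rest hsplit'] at hj
    rcases hj with h | h
    · exact Or.inl h.symm
    · exact Or.inr (Or.inr h)
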